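-- pv_equiv track=rewrite | github.com/cristianlincoln/python-1 | Practica4/Programas/Prueba_5.py | expansion_triplete_CAG
-- ===== SOURCE A (Python) =====
-- def expansion_triplete_CAG(cadena):
--     nueva = ""
--     comparar = "CAG"
--     encontrado = 0
--     contador = 0
--     maximo = 0
--     for i in range(len(cadena)):
--         contador = contador + 1
--         nueva = nueva + cadena[i]
--         if contador == 3:
--             if nueva == comparar:
--                 encontrado = encontrado + 1
--                 contador = 0
--                 nueva = ""
--                 if encontrado > maximo:
--                     maximo = encontrado
--             else:
--                 encontrado = 0
--                 contador = 0
--                 nueva = ""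
--
--     if maximo == 0:
--         return
--     else:
--         return maximo
-- ===== SOURCE B (Python) =====
-- def expansion_triplete_CAG(cadena):
--     # chunk into triplets; a trailing partial chunk can never equal "CAG"
--     flags = []
--     i = 0
--     while i < len(cadena):
--         flags.append(cadena[i:i + 3] == "CAG")
--         i += 3
--     flags.append(False)  # sentinel separator so every search finds a False
--     # longest run of True = max gap between consecutive False separators
--     maximo = 0
--     lo = 0
--     while lo < len(flags):
--         j = flags.index(False, lo)
--         if j - lo > maximo:
--             maximo = j - lo
--         lo = j + 1
--     return maximo if maximo > 0 else None
-- ===== Notes on version B (the rewrite author's own statement) =====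
-- stated objective: alternative
-- what changed: Replaces A's per-character state machine (3-counter with streak resets) by first slicing the string into triplet flags and then computing the longest streak as the maximum gap between consecutive False separators located with list.index(False, lo) after appending a sentinel separator.
import Mathlib
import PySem

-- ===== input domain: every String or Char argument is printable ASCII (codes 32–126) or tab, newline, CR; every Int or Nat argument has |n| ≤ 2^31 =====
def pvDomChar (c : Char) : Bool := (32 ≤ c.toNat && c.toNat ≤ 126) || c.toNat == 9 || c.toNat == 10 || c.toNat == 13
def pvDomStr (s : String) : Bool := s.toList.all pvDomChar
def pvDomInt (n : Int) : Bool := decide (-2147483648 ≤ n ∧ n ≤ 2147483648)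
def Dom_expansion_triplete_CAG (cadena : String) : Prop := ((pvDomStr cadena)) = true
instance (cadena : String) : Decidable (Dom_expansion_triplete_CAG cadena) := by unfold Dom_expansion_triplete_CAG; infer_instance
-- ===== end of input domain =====

-- B chunks the string into triplets by slicing at an index stepping by 3, then takes the longest
-- "CAG"-run as the maximum gap between non-"CAG" separators found with list.index(False, lo)
-- after appending a sentinel separator (objective: alternative algorithm, same result).

-- ===== PORT A =====
-- state = (nueva, encontrado, contador, maximo); one step per character, as in A's for-loop
def pvStepA (st : List Char × Int × Int × Int) (c : Char) : List Char × Int × Int × Int :=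
  let nueva := st.1 ++ [c]
  let encontrado := st.2.1
  let contador := st.2.2.1 + 1
  let maximo := st.2.2.2
  if contador = 3 then
    if nueva = ['C', 'A', 'G'] then
      ([], encontrado + 1, 0, if encontrado + 1 > maximo then encontrado + 1 else maximo)
    else
      ([], 0, 0, maximo)
  else
    (nueva, encontrado, contador, maximo)

def expansion_triplete_CAG (cadena : String) : Option Int :=
  let st := cadena.toList.foldl pvStepA ([], 0, 0, 0)
  if st.2.2.2 = 0 then none else some st.2.2.2

-- ===== PORT B =====
-- first while loop of Source B: flags.append(cadena[i:i+3] == "CAG"); i += 3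
-- (the slice cadena[i:i+3] with 0 ≤ i is exactly (drop i).take 3, cf. PySem.List.slice_natCast_add)
def pvChunkFrom (l : List Char) (i : Nat) : List Bool :=
  if h : i < l.length then
    decide ((l.drop i).take 3 = ['C', 'A', 'G']) :: pvChunkFrom l (i + 3)
  else []
termination_by l.length - i
decreasing_by omega

-- second while loop of Source B; flags.index(False, lo) searches from lo and returns the absolute
-- position, ported by hand (exact for lo ≤ len) as lo + index? (flags.drop lo); the none branch
-- (Python: ValueError) is unreachable because of the sentinel False at the end of flags
def pvScan (flags : List Bool) (lo : Nat) (maximo : Int) : Int :=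
  if _h : lo < flags.length then
    match PySem.List.index? (flags.drop lo) false with
    | some k =>
      let j : Int := ((lo + k : Nat) : Int)
      pvScan flags (lo + k + 1) (if j - lo > maximo then j - lo else maximo)
    | none => maximo
  else maximo
termination_by flags.length - lo
decreasing_by omega

def expansion_triplete_CAG_alt (cadena : String) : Option Int :=
  let flags := pvChunkFrom cadena.toList 0 ++ [false]  -- the sentinel append of Source B
  let maximo := pvScan flags 0 0
  if maximo > 0 then some maximo else none

-- ===== PRECONDITION & SPEC =====
def Spec_expansion_triplete_CAG (cadena : String) (out : Option Int) : Prop := out = expansion_triplete_CAG_alt cadena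
instance (cadena : String) (out : Option Int) : Decidable (Spec_expansion_triplete_CAG cadena out) := by unfold Spec_expansion_triplete_CAG; infer_instance

-- ===== CLAIM (what is proved, stated in full; the proofs are below) =====
def Claim_equal_expansion_triplete_CAG : Prop := ∀ (cadena : String), Dom_expansion_triplete_CAG cadena → Spec_expansion_triplete_CAG cadena (expansion_triplete_CAG cadena)

-- ===== LEMMAS AND PROOFS =====

-- specification-side chunking: flags of the triplets of l (trailing partial chunk gives false)
def pvChunkFlags : List Char → List Bool
  | [] => []
  | c :: rest => decide ((c :: rest).take 3 = ['C', 'A', 'G']) :: pvChunkFlags ((c :: rest).drop 3)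
termination_by l => l.length
decreasing_by simp

lemma pvChunkFlags_nil : pvChunkFlags [] = [] := by rw [pvChunkFlags.eq_def]

lemma pvChunkFlags_cons (c : Char) (rest : List Char) :
    pvChunkFlags (c :: rest) =
      decide ((c :: rest).take 3 = ['C', 'A', 'G']) :: pvChunkFlags ((c :: rest).drop 3) := by
  rw [pvChunkFlags.eq_def]

-- chunk-level reading of A's loop: streak counter e, running maximum m
def pvRunF : List Bool → Int → Int → Int
  | [], _, m => m
  | true :: r, e, m => pvRunF r (e + 1) (if e + 1 > m then e + 1 else m)
  | false :: r, _, m => pvRunF r 0 m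

-- "longest streak, given e leading credit"
def pvG : List Bool → Int → Int
  | [], e => e
  | true :: r, e => pvG r (e + 1)
  | false :: r, e => max e (pvG r 0)

lemma pvG_ge (l : List Bool) : ∀ e : Int, e ≤ pvG l e := by
  induction l with
  | nil => intro e; simp [pvG]
  | cons b r ih =>
    intro e
    cases b with
    | true => have := ih (e + 1); simp only [pvG]; omega
    | false => simp [pvG]

lemma pvRunF_eq_max_pvG (l : List Bool) :
    ∀ e m : Int, 0 ≤ e → e ≤ m → pvRunF l e m = max m (pvG l e) := by
  induction l with
  | nil => intro e m he hem; simp only [pvRunF, pvG]; omega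
  | cons b r ih =>
    intro e m he hem
    cases b with
    | true =>
      have h1 := ih (e + 1) (if e + 1 > m then e + 1 else m) (by omega) (by split <;> omega)
      have h2 := pvG_ge r (e + 1)
      simp only [pvRunF, pvG]
      rw [h1]
      omega
    | false =>
      have h1 := ih 0 m (by omega) (by omega)
      have h2 := pvG_ge r 0
      simp only [pvRunF, pvG]
      rw [h1]
      omega

lemma pvG_replicate (j : Nat) (l : List Bool) :
    ∀ e : Int, pvG (List.replicate j true ++ l) e = pvG l (e + j) := by
  induction j with
  | zero => intro e; simp
  | succ n ih =>
    intro e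
    simp only [List.replicate_succ, List.cons_append, pvG]
    rw [ih]
    congr 1
    push_cast
    ring

lemma pvG_append_false (l : List Bool) : ∀ e : Int, 0 ≤ e → pvG (l ++ [false]) e = pvG l e := by
  induction l with
  | nil => intro e he; simp only [List.nil_append, pvG]; omega
  | cons b r ih =>
    intro e he
    cases b with
    | true => simpa only [List.cons_append, pvG] using ih (e + 1) (by omega)
    | false => simp only [List.cons_append, pvG, ih 0 le_rfl]

-- A's character fold computes pvRunF on the chunk flags
lemma pvFoldA_eq_runF : ∀ (n : Nat) (l : List Char), l.length ≤ n → ∀ e m : Int,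
    (List.foldl pvStepA ([], e, 0, m) l).2.2.2 = pvRunF (pvChunkFlags l) e m := by
  intro n
  induction n with
  | zero =>
    intro l hl e m
    have : l = [] := List.eq_nil_of_length_eq_zero (by omega)
    subst this
    simp [pvChunkFlags_nil, pvRunF]
  | succ n ih =>
    intro l hl e m
    match l with
    | [] => simp [pvChunkFlags_nil, pvRunF]
    | [c] =>
      have hne : ¬ ([c] = ['C', 'A', 'G']) := by intro h; simp at h
      simp [pvStepA, pvChunkFlags_nil, pvChunkFlags_cons, pvRunF, hne]
    | [c1, c2] =>
      have hne : ¬ ([c1, c2] = ['C', 'A', 'G']) := by intro h; simp at h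
      simp [pvStepA, pvChunkFlags_nil, pvChunkFlags_cons, pvRunF, hne]
    | c1 :: c2 :: c3 :: r =>
      have hr : r.length ≤ n := by simp at hl; omega
      rw [pvChunkFlags_cons]
      by_cases hc : [c1, c2, c3] = ['C', 'A', 'G']
      · simp only [List.foldl, pvStepA]
        norm_num [hc]
        rw [ih r hr]
        simp only [pvRunF]
        congr 1
        split_ifs <;> omega
      · simp only [List.foldl, pvStepA]
        norm_num [hc]
        rw [ih r hr]
        simp only [pvRunF]

-- B's chunking loop builds exactly the chunk flags of the remaining suffix
lemma pvChunkFrom_eq : ∀ (n : Nat) (l : List Char) (i : Nat), l.length - i ≤ n →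
    pvChunkFrom l i = pvChunkFlags (l.drop i) := by
  intro n
  induction n with
  | zero =>
    intro l i hn
    have hge : l.length ≤ i := by omega
    rw [pvChunkFrom, dif_neg (by omega), List.drop_eq_nil_of_le hge, pvChunkFlags_nil]
  | succ n ih =>
    intro l i hn
    by_cases h : i < l.length
    · obtain ⟨c, rest, hcr⟩ : ∃ c rest, l.drop i = c :: rest := by
        cases hd : l.drop i with
        | nil => exact absurd (congrArg List.length hd) (by simp; omega)
        | cons c rest => exact ⟨c, rest, rfl⟩
      rw [pvChunkFrom, dif_pos h, ih l (i + 3) (by omega), hcr, pvChunkFlags_cons, ← hcr]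
      have hdd : l.drop (i + 3) = (l.drop i).drop 3 := by
        rw [List.drop_drop]
      rw [hdd]
    · rw [pvChunkFrom, dif_neg h, List.drop_eq_nil_of_le (by omega), pvChunkFlags_nil]

-- B's scan loop computes the running maximum of the gaps between False separators
lemma pvScan_eq : ∀ (n : Nat) (flags g : List Bool) (lo : Nat) (m : Int),
    flags.length - lo ≤ n → flags.drop lo = g ++ [false] → 0 ≤ m →
    pvScan flags lo m = max m (pvG (g ++ [false]) 0) := by
  intro n
  induction n with
  | zero =>
    intro flags g lo m hn hdrop hm
    have := congrArg List.length hdrop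
    simp at this
    omega
  | succ n ih =>
    intro flags g lo m hn hdrop hm
    have hlo : lo < flags.length := by
      have := congrArg List.length hdrop
      simp at this
      omega
    have hmem : false ∈ flags.drop lo := by rw [hdrop]; simp
    obtain ⟨k, hk⟩ := Option.isSome_iff_exists.mp
      ((PySem.List.index?_isSome_iff _ _).mpr hmem)
    obtain ⟨pre, suf, hsplit, hlen, hpre⟩ := (PySem.List.index?_eq_some_iff _ _ _).mp hk
    have hrep : pre = List.replicate pre.length true := by
      apply List.eq_replicate_of_mem
      intro b hb
      cases b with
      | false => exact absurd hb hpre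
      | true => rfl
    have hdropnext : flags.drop (lo + k + 1) = suf := by
      have : flags.drop (lo + k + 1) = (flags.drop lo).drop (k + 1) := by
        rw [List.drop_drop]; ring_nf
      rw [this, hsplit, ← hlen]
      simp [List.drop_append]
    have hGsplit : pvG (g ++ [false]) 0 = max (k : Int) (pvG suf 0) := by
      rw [← hdrop, hsplit, hrep, hlen, pvG_replicate]
      simp only [pvG]
      norm_num
    rw [pvScan, dif_pos hlo, hk]
    simp only []
    by_cases hsuf : suf = []
    · subst hsuf
      have hend : ¬ (lo + k + 1 < flags.length) := by
        have := congrArg List.length hdropnext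
        simp at this
        omega
      rw [pvScan, dif_neg hend, hGsplit]
      simp only [pvG]
      push_cast
      split_ifs <;> omega
    · obtain ⟨g', hg'⟩ : ∃ g', suf = g' ++ [false] := by
        rcases suf.eq_nil_or_concat with h | ⟨g'', a, hga⟩
        · exact absurd h hsuf
        · have h1 : (pre ++ false :: g'') ++ [a] = g ++ [false] := by
            rw [← hdrop, hsplit, hga]
            simp
          have h3 := (List.append_inj' h1 (by simp)).2
          simp at h3
          exact ⟨g'', by rw [hga, List.concat_eq_append, h3]⟩
      have hfuel : flags.length - (lo + k + 1) ≤ n := by omega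
      have hm' : (0 : Int) ≤ (if ((lo + k : Nat) : Int) - lo > m then ((lo + k : Nat) : Int) - lo else m) := by
        push_cast
        split_ifs <;> omega
      rw [ih flags g' (lo + k + 1) _ hfuel (by rw [hdropnext, hg']) hm', ← hg', hGsplit]
      push_cast
      split_ifs <;> omega

lemma pvG_nonneg (l : List Bool) : 0 ≤ pvG l 0 := pvG_ge l 0

-- ===== VERDICT (by name: the statement is the Claim_ definition above) =====
theorem expansion_triplete_CAG_spec : Claim_equal_expansion_triplete_CAG := by
  intro cadena _
  unfold Spec_expansion_triplete_CAG expansion_triplete_CAG expansion_triplete_CAG_alt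
  have hA := pvFoldA_eq_runF cadena.toList.length cadena.toList le_rfl 0 0
  have hR := pvRunF_eq_max_pvG (pvChunkFlags cadena.toList) 0 0 le_rfl le_rfl
  have hChunk := pvChunkFrom_eq cadena.toList.length cadena.toList 0 (by omega)
  have hScan := pvScan_eq (pvChunkFrom cadena.toList 0 ++ [false]).length
    (pvChunkFrom cadena.toList 0 ++ [false]) (pvChunkFrom cadena.toList 0) 0 0
    (by omega) (by simp) le_rfl
  have hDrop0 : cadena.toList.drop 0 = cadena.toList := by simp
  rw [hDrop0] at hChunk
  have hGF := pvG_append_false (pvChunkFlags cadena.toList) 0 le_rfl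
  have hG := pvG_nonneg (pvChunkFlags cadena.toList)
  simp only []
  rw [hA, hR, hScan, hChunk, hGF]
  split_ifs <;> first | rfl | omega
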